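-- pv_equiv track=rewrite | github.com/was1a1fairy/algorithms | tasks.py | max_count_numbers
-- ===== SOURCE A (Python) =====
-- def max_count_numbers(array: list[int]) -> int:
--
--     if not isinstance(array, list):  raise TypeError
--
--     new_array = []
--
--     for num in array:
--         counter = 0
--         for number in array:
--             if num == number:
--                 counter += 1
--         new_array.append(counter)
--
--     max_count = 0
--
--     for i in range(len(new_array)):
--         if new_array[i] > max_count:
--             max_count = new_array[i]
--
--     list_max_count_elem = []
--
--     for i in range(len(new_array)):
--         if new_array[i] == max_count:
--             list_max_count_elem.append(array[i])
--
--
--     min_elem = list_max_count_elem[0]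
--
--     for elem in list_max_count_elem:
--         if elem < min_elem:
--             min_elem = elem
--
--     return min_elem
-- ===== SOURCE B (Python) =====
-- def max_count_numbers(array: list[int]) -> int:
--
--     if not isinstance(array, list):
--         raise TypeError
--
--     counts = {}
--     for x in array:
--         counts[x] = counts.get(x, 0) + 1
--
--     m = max(counts.values())
--
--     return min(x for x, c in counts.items() if c == m)
-- ===== Notes on version B (the rewrite author's own statement) =====
-- stated objective: faster
-- what changed: Replaces A's quadratic nested-loop counting (count each element against the whole list, then three more index passes) by a single hash-map counting pass followed by max over the counts and min over the keys attaining it.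
import Mathlib
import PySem

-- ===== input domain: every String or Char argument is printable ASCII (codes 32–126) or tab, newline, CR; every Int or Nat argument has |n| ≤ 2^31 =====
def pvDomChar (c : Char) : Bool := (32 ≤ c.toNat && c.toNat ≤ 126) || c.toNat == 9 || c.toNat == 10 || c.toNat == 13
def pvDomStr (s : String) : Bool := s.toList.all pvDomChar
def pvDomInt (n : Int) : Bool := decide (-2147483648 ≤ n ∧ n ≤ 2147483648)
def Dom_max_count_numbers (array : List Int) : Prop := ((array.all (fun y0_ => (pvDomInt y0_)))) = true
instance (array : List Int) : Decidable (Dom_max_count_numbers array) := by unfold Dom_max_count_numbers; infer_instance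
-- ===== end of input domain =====

-- B replaces A's O(n^2) nested-loop counting by one hash-map counting pass, then max over counts and min over the keys attaining it.

-- ===== PORT A =====
def max_count_numbers (array : List Int) : Int :=
  let new_array : List Int := array.foldl (fun acc num =>
    acc ++ [array.foldl (fun counter number => if num == number then counter + 1 else counter) (0 : Int)]) []
  let max_count : Int := (PySem.List.pyRange 0 (new_array.length : Int) 1).foldl
    (fun mc i => if PySem.List.pyGetD new_array i 0 > mc then PySem.List.pyGetD new_array i 0 else mc) 0
  let lst : List Int := (PySem.List.pyRange 0 (new_array.length : Int) 1).foldl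
    (fun acc i => if PySem.List.pyGetD new_array i 0 == max_count then acc ++ [PySem.List.pyGetD array i 0] else acc) []
  match PySem.List.pyGet? lst 0 with
  | none => 0  -- IndexError on the empty input; excluded by Pre_
  | some m0 => lst.foldl (fun me elem => if elem < me then elem else me) m0

-- ===== PORT B =====
def max_count_numbers_alt (array : List Int) : Int :=
  let counts : PySem.Dict Int Int :=
    array.foldl (fun d x => d.insert x (d.getD x 0 + 1)) PySem.Dict.empty
  match PySem.List.max? (PySem.Dict.values counts) (fun v => v) with
  | none => 0  -- ValueError of max() on the empty input; excluded by Pre_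
  | some m =>
    match PySem.List.min? (((PySem.Dict.items counts).filter (fun p => p.2 == m)).map (·.1)) (fun x => x) with
    | none => 0
    | some r => r

-- ===== PRECONDITION & SPEC =====
-- A raises IndexError (and B's max() raises ValueError) on the empty list; that input is excluded.
def Pre_max_count_numbers (array : List Int) : Prop := array ≠ []
instance (array : List Int) : Decidable (Pre_max_count_numbers array) := by unfold Pre_max_count_numbers; infer_instance
def pvWitness_max_count_numbers : List Int := [3, 1, 1, 2]

def Spec_max_count_numbers (array : List Int) (out : Int) : Prop := out = max_count_numbers_alt array
instance (array : List Int) (out : Int) : Decidable (Spec_max_count_numbers array out) := by unfold Spec_max_count_numbers; infer_instance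

-- ===== CLAIM (what is proved, stated in full; the proofs are below) =====
def Claim_equal_max_count_numbers : Prop := ∀ (array : List Int), Dom_max_count_numbers array → Pre_max_count_numbers array → Spec_max_count_numbers array (max_count_numbers array)

-- ===== LEMMAS AND PROOFS =====
-- ===== LEMMAS AND PROOFS =====
-- general fact: the strict-greater running-max body is `max`
theorem pv_ite_gt_eq_max (mc v : Int) : (if v > mc then v else mc) = max mc v := by
  by_cases h : mc < v <;> simp [max_def] <;> omega

theorem pv_ite_lt_eq_min (me e : Int) : (if e < me then e else me) = min me e := by
  by_cases h : e < me <;> simp [min_def] <;> omega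

-- A's inner counting loop is List.count
theorem pv_inner_count (array : List Int) (num : Int) :
    array.foldl (fun counter number => if num == number then counter + 1 else counter) (0 : Int)
      = (List.count num array : Int) := by
  rw [PySem.List.foldl_congr_mem array _ (fun counter number => if number == num then counter + 1 else counter) _
      (by intro acc x _; simp [BEq.comm])]
  rw [PySem.List.foldl_beq_add_one]
  simp

-- ===== VERDICT (by name: the statement is the Claim_ definition above) =====
theorem max_count_numbers_spec : Claim_equal_max_count_numbers := by
  intro array _ hne
  obtain ⟨a0, tl, ha⟩ := List.exists_cons_of_ne_nil hne
  simp only [Spec_max_count_numbers, max_count_numbers, max_count_numbers_alt]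
  rw [PySem.List.foldl_append_singleton_eq_map]
  simp only [List.nil_append]
  have hmapcnt : (array.map fun num =>
      array.foldl (fun counter number => if num == number then counter + 1 else counter) (0 : Int))
      = array.map (fun x => (List.count x array : Int)) :=
    List.map_congr_left (fun num _ => pv_inner_count array num)
  rw [hmapcnt]
  set cnt : Int → Int := fun x => (List.count x array : Int) with hcnt
  -- A's max_count loop
  rw [PySem.List.foldl_pyRange_zero_pyGetD' (array.map cnt) 0
      (fun mc v => if v > mc then v else mc) 0]
  rw [PySem.List.foldl_congr_mem _ _ (fun mc v => max mc v) _
      (by intro acc x _; exact pv_ite_gt_eq_max acc x)]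
  set M : Int := (array.map cnt).foldl max 0 with hM
  -- facts about M
  have hcnt_a0 : (1 : Int) ≤ cnt a0 := by
    simp only [hcnt]
    have : 0 < List.count a0 array := List.count_pos_iff.mpr (ha ▸ List.mem_cons_self ..)
    exact_mod_cast this
  have hM_ub : ∀ y ∈ array.map cnt, y ≤ M := (PySem.List.le_foldl_max _ _).2
  have hM_ge1 : (1 : Int) ≤ M :=
    le_trans hcnt_a0 (hM_ub _ (List.mem_map_of_mem (ha ▸ List.mem_cons_self ..)))
  have hM_mem : M ∈ array.map cnt := by
    rcases PySem.List.foldl_max_mem (array.map cnt) 0 with h | h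
    · rw [hM] at hM_ge1; omega
    · exact h
  obtain ⟨x0, hx0_mem, hx0⟩ := List.mem_map.mp hM_mem
  -- A's third loop
  have hlen : ((array.map cnt).length : Int) = (array.length : Int) := by simp
  rw [hlen]
  rw [PySem.List.foldl_congr_mem _ _
      (fun acc i => if cnt (PySem.List.pyGetD array i 0) == M then acc ++ [PySem.List.pyGetD array i 0] else acc) _
      (by
        intro acc i hi
        beta_reduce
        obtain ⟨h0, h1⟩ := PySem.List.mem_pyRange_one.mp hi
        rw [PySem.List.pyGetD_eq_getElem (array.map cnt) 0 h0 (by simpa using h1),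
            PySem.List.pyGetD_eq_getElem array 0 h0 h1]
        simp)]
  rw [PySem.List.foldl_pyRange_zero_pyGetD' array 0
      (fun acc x => if cnt x == M then acc ++ [x] else acc) ([] : List Int)]
  rw [PySem.List.foldl_append_if_eq_filter (fun x => cnt x == M) array []]
  simp only [List.nil_append]
  set lst : List Int := array.filter (fun x => cnt x == M) with hlst
  have hx0_lst : x0 ∈ lst := by
    rw [hlst]; exact List.mem_filter.mpr ⟨hx0_mem, by simp [hx0]⟩
  obtain ⟨h0, t0, hl0⟩ := List.exists_cons_of_ne_nil (List.ne_nil_of_mem hx0_lst)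
  rw [hl0]
  have hget : PySem.List.pyGet? (h0 :: t0) 0 = some h0 := by
    simp [PySem.List.pyGet?, PySem.List.pyIdx?]
  rw [hget]
  show List.foldl _ h0 (h0 :: t0) = _
  rw [List.foldl_cons, ite_self]
  rw [PySem.List.foldl_congr_mem _ _ (fun me e => min me e) _
      (by intro acc x _; exact pv_ite_lt_eq_min acc x)]
  have hA_mem : t0.foldl min h0 ∈ lst := by
    rw [hl0]
    rcases PySem.List.foldl_min_mem t0 h0 with h | h
    · rw [h]; exact List.mem_cons_self ..
    · exact List.mem_cons_of_mem _ h
  have hA_min : ∀ y ∈ lst, t0.foldl min h0 ≤ y := by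
    rw [hl0]; intro y hy
    rcases List.mem_cons.mp hy with h | hy
    · exact h ▸ (PySem.List.foldl_min_le t0 h0).1
    · exact (PySem.List.foldl_min_le t0 h0).2 y hy
  -- B side
  rw [PySem.Dict.foldl_insert_getD_add_one_eq_counter]
  have hvals : (PySem.Dict.counter array).values = (PySem.Set.ofList array).map cnt := by
    show ((PySem.Dict.counter array).items).map (·.2) = _
    rw [PySem.Dict.items_counter]
    simp [hcnt]
  have hitems : (PySem.Dict.counter array).items
      = (PySem.Set.ofList array).map (fun k => (k, cnt k)) := by
    rw [PySem.Dict.items_counter]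
  have ha0S : a0 ∈ PySem.Set.ofList array := (PySem.Set.mem_ofList _ _).mpr (ha ▸ List.mem_cons_self ..)
  rcases hmq : PySem.List.max? ((PySem.Dict.counter array).values) (fun v => v) with _ | m
  · rw [PySem.List.max?_eq_none_iff] at hmq
    rw [hvals] at hmq
    exact absurd (List.map_eq_nil_iff.mp hmq) (List.ne_nil_of_mem ha0S)
  · have hm_mem : m ∈ (PySem.Set.ofList array).map cnt := by rw [← hvals]; exact PySem.List.max?_mem hmq
    have hm_ub : ∀ y ∈ (PySem.Set.ofList array).map cnt, y ≤ m := by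
      rw [← hvals]; exact fun y hy => PySem.List.max?_isMax hmq y hy
    obtain ⟨k0, hk0S, hk0⟩ := List.mem_map.mp hm_mem
    have hmM : m = M := by
      apply le_antisymm
      · rw [← hk0]
        exact hM_ub _ (List.mem_map_of_mem ((PySem.Set.mem_ofList _ _).mp hk0S))
      · rw [← hx0]
        exact hm_ub _ (List.mem_map_of_mem ((PySem.Set.mem_ofList _ _).mpr hx0_mem))
    show _ = match PySem.List.min? (((PySem.Dict.counter array).items.filter (fun p => p.2 == m)).map (·.1)) (fun x => x) with
      | none => 0
      | some r => r
    have hL : (((PySem.Dict.counter array).items).filter (fun p => p.2 == m)).map (·.1)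
        = (PySem.Set.ofList array).filter (fun k => cnt k == m) := by
      rw [hitems, List.filter_map, List.map_map]
      simp [Function.comp_def]
    rw [hL]
    have hx0L : x0 ∈ (PySem.Set.ofList array).filter (fun k => cnt k == m) :=
      List.mem_filter.mpr ⟨(PySem.Set.mem_ofList _ _).mpr hx0_mem, by simp [hx0, hmM]⟩
    rcases hrq : PySem.List.min? ((PySem.Set.ofList array).filter (fun k => cnt k == m)) (fun x => x) with _ | r
    · rw [PySem.List.min?_eq_none_iff] at hrq
      exact absurd hrq (List.ne_nil_of_mem hx0L)
    · have hr_mem : r ∈ (PySem.Set.ofList array).filter (fun k => cnt k == m) := PySem.List.min?_mem hrq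
      have hr_min : ∀ y ∈ (PySem.Set.ofList array).filter (fun k => cnt k == m), r ≤ y :=
        fun y hy => PySem.List.min?_isMin hrq y hy
      have hsame : ∀ y, y ∈ lst ↔ y ∈ (PySem.Set.ofList array).filter (fun k => cnt k == m) := by
        intro y
        rw [hlst, List.mem_filter, List.mem_filter, PySem.Set.mem_ofList, hmM]
      show List.foldl min h0 t0 = r
      exact le_antisymm (hA_min r ((hsame r).mpr hr_mem)) (hr_min _ ((hsame _).mp hA_mem))
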